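-- pv_equiv track=rewrite | github.com/colefuerth/AdventOfCode2024 | day23/AoC.py | find_next_largest_group
-- ===== SOURCE A (Python) =====
-- from itertools import product
-- from typing import List, Set, Tuple, Dict
--
-- def find_next_largest_group(
--     groups: Set[Tuple[str]], network: Dict[str, List[str]]
-- ) -> Tuple[str]:
--     next_groups = set()
--     for node, group in product(network, groups):
--         if node in group:
--             continue
--         nodegroup = network[node]
--         if all(groupnode in nodegroup for groupnode in group):
--             next_groups.add(tuple(sorted(list(group) + [node])))
--     if not next_groups:
--         return groups
--     return find_next_largest_group(next_groups, network)
-- ===== SOURCE B (Python) =====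
-- def find_next_largest_group(groups, network):
--     adj = {node: set(neigh) for node, neigh in network.items()}
--     while True:
--         out = []
--         for node in network:
--             a = adj[node]
--             out.extend(
--                 tuple(sorted((*g, node)))
--                 for g in groups
--                 if node not in g and a.issuperset(g)
--             )
--         nxt = set(out)
--         if not nxt:
--             return groups
--         groups = nxt
-- ===== Notes on version B (the rewrite author's own statement) =====
-- stated objective: alternative
-- what changed: B precomputes a dict of neighbour sets once and tests extension with set.issuperset instead of scanning the adjacency list per member, builds each level as one flat extended candidate list per node (filter+map comprehension) collapsed into a set at level end instead of per-candidate set.add inside a product scan, and replaces A's tail recursion with a while-True loop.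
import Mathlib
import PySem

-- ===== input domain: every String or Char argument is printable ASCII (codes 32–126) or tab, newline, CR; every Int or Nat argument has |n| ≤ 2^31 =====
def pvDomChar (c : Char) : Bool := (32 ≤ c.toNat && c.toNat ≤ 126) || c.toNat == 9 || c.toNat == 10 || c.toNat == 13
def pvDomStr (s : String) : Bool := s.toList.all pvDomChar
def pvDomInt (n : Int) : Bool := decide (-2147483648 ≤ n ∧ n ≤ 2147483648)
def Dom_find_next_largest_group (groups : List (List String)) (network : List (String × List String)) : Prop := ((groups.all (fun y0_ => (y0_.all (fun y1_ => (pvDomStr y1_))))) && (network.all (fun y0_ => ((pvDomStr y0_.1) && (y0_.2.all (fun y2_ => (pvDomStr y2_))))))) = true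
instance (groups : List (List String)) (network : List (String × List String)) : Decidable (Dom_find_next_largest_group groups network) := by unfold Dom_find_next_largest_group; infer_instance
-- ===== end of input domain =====

-- B precomputes the adjacency as a dict of neighbour SETS once, builds each level as one flat
-- candidate list (extend of a comprehension per node) collapsed into a set at the end of the level,
-- and replaces A's tail recursion by a while-loop (objective: alternative decomposition).

-- ===== PORT A =====
-- one level of growth: next_groups built over product(network, groups), set built with .add
def pvA_step (groups : List (List String)) (network : List (String × List String)) : List (List String) :=
  network.foldl (fun acc p =>
    groups.foldl (fun acc2 g =>
      if p.1 ∈ g then acc2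
      else
        let nodegroup := (PySem.Dict.mk network).getD p.1 []
        if g.all (fun m => decide (m ∈ nodegroup)) then
          PySem.Set.add acc2 (PySem.List.sorted (g ++ [p.1]) (fun x => x) false)
        else acc2) acc)
    PySem.Set.empty

-- the recursion of A, with fuel: each recursive call adds a distinct key of `network` to every
-- surviving group, so network.length + 1 levels always suffice
def pvA_go : Nat → List (List String) → List (String × List String) → List (List String)
  | 0, groups, _ => groups
  | Nat.succ f, groups, network =>
    let next_groups := pvA_step groups network
    if next_groups.isEmpty then groups else pvA_go f next_groups network

def find_next_largest_group (groups : List (List String)) (network : List (String × List String)) : List (List String) :=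
  pvA_go (network.length + 1) groups network

-- ===== PORT B =====
-- adj = {node: set(neigh) for node, neigh in network.items()}
def pvB_adj (network : List (String × List String)) : PySem.Dict String (PySem.Set String) :=
  PySem.Dict.mk (network.map (fun q => (q.1, PySem.Set.ofList q.2)))

-- one level: out.extend(comprehension) per node, then set(out)
def pvB_step (adj : PySem.Dict String (PySem.Set String))
    (groups : List (List String)) (network : List (String × List String)) : List (List String) :=
  PySem.Set.ofList (network.flatMap (fun p =>
    (groups.filter (fun g =>
        !decide (p.1 ∈ g) && PySem.Set.issuperset (adj.getD p.1 PySem.Set.empty) g)).map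
      (fun g => PySem.List.sorted (g ++ [p.1]) (fun x => x) false)))

-- the while-True loop, with the same always-sufficient fuel bound
def pvB_loop (adj : PySem.Dict String (PySem.Set String)) :
    Nat → List (List String) → List (String × List String) → List (List String)
  | 0, groups, _ => groups
  | Nat.succ f, groups, network =>
    match pvB_step adj groups network with
    | [] => groups
    | nxt => pvB_loop adj f nxt network

def find_next_largest_group_alt (groups : List (List String)) (network : List (String × List String)) : List (List String) :=
  pvB_loop (pvB_adj network) (network.length + 1) groups network

-- ===== PRECONDITION & SPEC =====
def Spec_find_next_largest_group (groups : List (List String)) (network : List (String × List String)) (out : List (List String)) : Prop := out = find_next_largest_group_alt groups network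
instance (groups : List (List String)) (network : List (String × List String)) (out : List (List String)) : Decidable (Spec_find_next_largest_group groups network out) := by unfold Spec_find_next_largest_group; infer_instance

-- ===== CLAIM (what is proved, stated in full; the proofs are below) =====
def Claim_equal_find_next_largest_group : Prop := ∀ (groups : List (List String)) (network : List (String × List String)), Dom_find_next_largest_group groups network → Spec_find_next_largest_group groups network (find_next_largest_group groups network)

-- ===== LEMMAS AND PROOFS =====

-- B's adjacency-set lookup is the set of A's adjacency-list lookup
lemma adj_getD (net : List (String × List String)) (k : String) :
    (pvB_adj net).getD k PySem.Set.empty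
      = PySem.Set.ofList ((PySem.Dict.mk net).getD k []) := by
  induction net with
  | nil => rfl
  | cons q rest ih =>
    obtain ⟨a, L⟩ := q
    simp only [pvB_adj, List.map_cons, PySem.Dict.getD, PySem.Dict.get?_mk_cons] at *
    by_cases h : a == k
    · simp [h]
    · simp only [h, Bool.false_eq_true, if_false]
      exact ih

-- B's superset test is A's all-membership scan
lemma issuperset_ofList (L g : List String) :
    PySem.Set.issuperset (PySem.Set.ofList L) g = g.all (fun m => decide (m ∈ L)) := by
  simp only [PySem.Set.issuperset, PySem.Set.issubset, PySem.Set.contains]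
  refine List.all_congr rfl (fun m => ?_)
  rw [Bool.eq_iff_iff]
  simp [PySem.Set.mem_ofList]

-- an accumulated fold of Set.add over per-node blocks is the set of the flattened list
lemma foldl_blocks_eq_ofList_flatMap {α : Type} (g : α → List (List String)) :
    ∀ (l : List α) (acc : List (List String)),
      l.foldl (fun s p => (g p).foldl PySem.Set.add s) (PySem.Set.ofList acc)
        = PySem.Set.ofList (acc ++ l.flatMap g) := by
  intro l
  induction l with
  | nil => intro acc; simp
  | cons p l ih =>
    intro acc
    have h1 : (g p).foldl PySem.Set.add (PySem.Set.ofList acc)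
        = PySem.Set.ofList (acc ++ g p) := by
      rw [PySem.Set.ofList_append]; rfl
    simp only [List.foldl_cons, h1, ih (acc ++ g p), List.flatMap_cons, List.append_assoc]

-- the two level functions agree
lemma step_eq (groups : List (List String)) (network : List (String × List String)) :
    pvA_step groups network = pvB_step (pvB_adj network) groups network := by
  unfold pvA_step pvB_step
  have hbody : ∀ (p : String × List String) (s : PySem.Set (List String)),
      groups.foldl (fun acc2 g =>
        if p.1 ∈ g then acc2
        else
          let nodegroup := (PySem.Dict.mk network).getD p.1 []
          if g.all (fun m => decide (m ∈ nodegroup)) then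
            PySem.Set.add acc2 (PySem.List.sorted (g ++ [p.1]) (fun x => x) false)
          else acc2) s
      = ((groups.filter (fun g =>
            !decide (p.1 ∈ g) && PySem.Set.issuperset ((pvB_adj network).getD p.1 PySem.Set.empty) g)).map
          (fun g => PySem.List.sorted (g ++ [p.1]) (fun x => x) false)).foldl PySem.Set.add s := by
    intro p s
    rw [List.foldl_map, ← PySem.List.foldl_if_eq_foldl_filter
      (p := fun g => !decide (p.1 ∈ g) &&
        PySem.Set.issuperset ((pvB_adj network).getD p.1 PySem.Set.empty) g)]
    refine PySem.List.foldl_congr_mem _ _ _ _ (fun acc g _ => ?_)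
    rw [adj_getD, issuperset_ofList]
    by_cases hg : p.1 ∈ g
    · simp [hg]
    · simp only [hg, decide_false, Bool.not_false, Bool.true_and]
      by_cases hall : g.all (fun m => decide (m ∈ (PySem.Dict.mk network).getD p.1 [])) = true
      · simp [hall]
      · simp only [Bool.not_eq_true] at hall; simp [hall]
  calc network.foldl (fun acc p => groups.foldl _ acc) PySem.Set.empty
      = network.foldl (fun s p =>
          (((groups.filter (fun g =>
              !decide (p.1 ∈ g) && PySem.Set.issuperset ((pvB_adj network).getD p.1 PySem.Set.empty) g)).map
            (fun g => PySem.List.sorted (g ++ [p.1]) (fun x => x) false))).foldl PySem.Set.add s)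
          (PySem.Set.ofList []) := by
        exact PySem.List.foldl_congr_mem _ _ _ _ (fun s p _ => hbody p s)
    _ = _ := by
        rw [foldl_blocks_eq_ofList_flatMap]; simp

-- the two drivers agree level by level
lemma go_eq (f : Nat) (groups : List (List String)) (network : List (String × List String)) :
    pvA_go f groups network = pvB_loop (pvB_adj network) f groups network := by
  induction f generalizing groups with
  | zero => rfl
  | succ f ih =>
    simp only [pvA_go, pvB_loop, step_eq]
    cases h : pvB_step (pvB_adj network) groups network with
    | nil => simp
    | cons a t => simp [ih]

-- ===== VERDICT (by name: the statement is the Claim_ definition above) =====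
theorem find_next_largest_group_spec : Claim_equal_find_next_largest_group := by
  intro groups network _
  unfold Spec_find_next_largest_group find_next_largest_group find_next_largest_group_alt
  exact go_eq _ groups network
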